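-- pv_equiv track=rewrite | github.com/vtrpza/project-bingx | core/risk_manager.py | _are_correlated_assets
-- ===== SOURCE A (Python) =====
-- def _are_correlated_assets(asset1: str, asset2: str) -> bool:
--     """Verifica se dois assets têm alta correlação"""
--     # Grupos de correlação conhecidos
--     major_crypto = {"BTC", "ETH", "BNB", "ADA", "DOT", "LINK"}
--     defi_tokens = {"UNI", "SUSHI", "AAVE", "CRV", "YFI", "1INCH"}
--     layer1_tokens = {"SOL", "AVAX", "MATIC", "FTM", "ATOM", "NEAR"}
--     meme_tokens = {"DOGE", "SHIB", "PEPE", "FLOKI", "BONK"}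
--
--     correlation_groups = [major_crypto, defi_tokens, layer1_tokens, meme_tokens]
--
--     for group in correlation_groups:
--         if asset1 in group and asset2 in group:
--             return True
--
--     return asset1 == asset2
-- ===== SOURCE B (Python) =====
-- _GROUP_INDEX = {
--     sym: i
--     for i, group in enumerate((
--         ("BTC", "ETH", "BNB", "ADA", "DOT", "LINK"),
--         ("UNI", "SUSHI", "AAVE", "CRV", "YFI", "1INCH"),
--         ("SOL", "AVAX", "MATIC", "FTM", "ATOM", "NEAR"),
--         ("DOGE", "SHIB", "PEPE", "FLOKI", "BONK"),
--     ))
--     for sym in group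
-- }
--
--
-- def _are_correlated_assets(asset1: str, asset2: str) -> bool:
--     """Inverted index: one dict lookup per asset instead of scanning the groups."""
--     g1 = _GROUP_INDEX.get(asset1)
--     g2 = _GROUP_INDEX.get(asset2)
--     return (g1 is not None and g1 == g2) or asset1 == asset2
-- ===== Notes on version B (the rewrite author's own statement) =====
-- stated objective: idiomatic
-- what changed: Replaces the scan over the four correlation groups (testing both assets per group) by a precomputed inverted index mapping each symbol to its group id, so the body is two O(1) dict lookups plus the identity fallback.
import Mathlib
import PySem

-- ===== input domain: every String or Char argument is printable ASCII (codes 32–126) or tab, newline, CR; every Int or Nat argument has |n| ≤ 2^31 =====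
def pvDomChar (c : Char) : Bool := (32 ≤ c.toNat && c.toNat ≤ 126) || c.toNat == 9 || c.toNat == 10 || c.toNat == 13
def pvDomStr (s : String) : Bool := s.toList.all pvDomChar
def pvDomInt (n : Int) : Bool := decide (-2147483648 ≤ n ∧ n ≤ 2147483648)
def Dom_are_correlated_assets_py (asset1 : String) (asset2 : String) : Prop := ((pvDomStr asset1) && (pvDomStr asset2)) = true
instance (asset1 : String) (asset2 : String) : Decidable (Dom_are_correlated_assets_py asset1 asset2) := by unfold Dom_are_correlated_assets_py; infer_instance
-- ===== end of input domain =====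

-- B replaces A's scan over the four groups by a precomputed symbol→group-id inverted index (two lookups); return values proved equal.

-- ===== PORT A =====
def pvGroupsA : List (PySem.Set String) :=
  [PySem.Set.ofList ["BTC", "ETH", "BNB", "ADA", "DOT", "LINK"],
   PySem.Set.ofList ["UNI", "SUSHI", "AAVE", "CRV", "YFI", "1INCH"],
   PySem.Set.ofList ["SOL", "AVAX", "MATIC", "FTM", "ATOM", "NEAR"],
   PySem.Set.ofList ["DOGE", "SHIB", "PEPE", "FLOKI", "BONK"]]

-- the 'for group in correlation_groups' loop with its early 'return True'
def pvLoopA : List (PySem.Set String) → String → String → Bool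
  | [], a1, a2 => a1 == a2
  | g :: rest, a1, a2 =>
      if PySem.Set.contains g a1 && PySem.Set.contains g a2 then true
      else pvLoopA rest a1 a2

def are_correlated_assets_py (asset1 : String) (asset2 : String) : Bool :=
  pvLoopA pvGroupsA asset1 asset2

-- ===== PORT B =====
-- module-level dict comprehension of Source B: {sym: i for i, group in enumerate(...) for sym in group}
def pvGroupIndex : PySem.Dict String Int :=
  (PySem.List.enumerate
    [["BTC", "ETH", "BNB", "ADA", "DOT", "LINK"],
     ["UNI", "SUSHI", "AAVE", "CRV", "YFI", "1INCH"],
     ["SOL", "AVAX", "MATIC", "FTM", "ATOM", "NEAR"],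
     ["DOGE", "SHIB", "PEPE", "FLOKI", "BONK"]]).foldl
    (fun d p => p.2.foldl (fun d sym => d.insert sym p.1) d)
    PySem.Dict.empty

def are_correlated_assets_py_alt (asset1 : String) (asset2 : String) : Bool :=
  let g1 := pvGroupIndex.get? asset1
  let g2 := pvGroupIndex.get? asset2
  (g1.isSome && g1 == g2) || asset1 == asset2

-- ===== PRECONDITION & SPEC =====
def Spec_are_correlated_assets_py (asset1 : String) (asset2 : String) (out : Bool) : Prop := out = are_correlated_assets_py_alt asset1 asset2
instance (asset1 : String) (asset2 : String) (out : Bool) : Decidable (Spec_are_correlated_assets_py asset1 asset2 out) := by unfold Spec_are_correlated_assets_py; infer_instance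

-- ===== CLAIM (what is proved, stated in full; the proofs are below) =====
def Claim_equal_are_correlated_assets_py : Prop := ∀ (asset1 : String) (asset2 : String), Dom_are_correlated_assets_py asset1 asset2 → Spec_are_correlated_assets_py asset1 asset2 (are_correlated_assets_py asset1 asset2)

-- ===== LEMMAS AND PROOFS =====

-- all 22 symbols that occur in either program
def pvAllSyms : List String :=
  ["BTC", "ETH", "BNB", "ADA", "DOT", "LINK",
   "UNI", "SUSHI", "AAVE", "CRV", "YFI", "1INCH",
   "SOL", "AVAX", "MATIC", "FTM", "ATOM", "NEAR",
   "DOGE", "SHIB", "PEPE", "FLOKI", "BONK"]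

lemma pv_not_mem_A (s t : String) (h : s ∉ pvAllSyms) :
    are_correlated_assets_py s t = (s == t) := by
  simp [pvAllSyms, not_or] at h
  obtain ⟨h1, h2, h3, h4, h5, h6, h7, h8, h9, h10, h11, h12, h13, h14, h15, h16, h17, h18, h19, h20, h21, h22, h23⟩ := h
  simp [are_correlated_assets_py, pvLoopA, pvGroupsA, PySem.Set.contains, PySem.Set.ofList,
        h1, h2, h3, h4, h5, h6, h7, h8, h9, h10, h11, h12, h13, h14, h15, h16, h17, h18,
        h19, h20, h21, h22, h23]

lemma pv_not_mem_A' (s t : String) (h : t ∉ pvAllSyms) :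
    are_correlated_assets_py s t = (s == t) := by
  simp [pvAllSyms, not_or] at h
  obtain ⟨h1, h2, h3, h4, h5, h6, h7, h8, h9, h10, h11, h12, h13, h14, h15, h16, h17, h18, h19, h20, h21, h22, h23⟩ := h
  simp [are_correlated_assets_py, pvLoopA, pvGroupsA, PySem.Set.contains, PySem.Set.ofList,
        h1, h2, h3, h4, h5, h6, h7, h8, h9, h10, h11, h12, h13, h14, h15, h16, h17, h18,
        h19, h20, h21, h22, h23]

lemma pv_not_mem_idx (s : String) (h : s ∉ pvAllSyms) :
    pvGroupIndex.get? s = none := by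
  simp [pvAllSyms, not_or] at h
  obtain ⟨h1, h2, h3, h4, h5, h6, h7, h8, h9, h10, h11, h12, h13, h14, h15, h16, h17, h18, h19, h20, h21, h22, h23⟩ := h
  simp [pvGroupIndex, PySem.List.enumerate, PySem.Dict.insert, PySem.Dict.empty, PySem.Dict.get?,
        Ne.symm h1, Ne.symm h2, Ne.symm h3, Ne.symm h4, Ne.symm h5, Ne.symm h6, Ne.symm h7,
        Ne.symm h8, Ne.symm h9, Ne.symm h10, Ne.symm h11, Ne.symm h12, Ne.symm h13, Ne.symm h14,
        Ne.symm h15, Ne.symm h16, Ne.symm h17, Ne.symm h18, Ne.symm h19, Ne.symm h20,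
        Ne.symm h21, Ne.symm h22, Ne.symm h23]

-- ===== VERDICT (by name: the statement is the Claim_ definition above) =====
theorem are_correlated_assets_py_spec : Claim_equal_are_correlated_assets_py := by
  intro a1 a2 _
  show are_correlated_assets_py a1 a2 = are_correlated_assets_py_alt a1 a2
  by_cases h1 : a1 ∈ pvAllSyms
  · by_cases h2 : a2 ∈ pvAllSyms
    · fin_cases h1 <;> fin_cases h2 <;> decide
    · rw [pv_not_mem_A' a1 a2 h2]
      simp only [are_correlated_assets_py_alt, pv_not_mem_idx a2 h2]
      cases hg : pvGroupIndex.get? a1 <;> simp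
  · rw [pv_not_mem_A a1 a2 h1]
    simp only [are_correlated_assets_py_alt, pv_not_mem_idx a1 h1]
    simp
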